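-- pv_equiv track=rewrite | github.com/CDMY0417/Tool_MATH | function_tools/function_total/ynr3h2.py | count_permutations_with_repetitions
-- ===== SOURCE A (Python) =====
-- def count_permutations_with_repetitions(items: list):
--     from math import factorial
--     from collections import Counter
--     counts = Counter(items)
--     num = factorial(len(items))
--     denom = 1
--     for count in counts.values():
--         denom *= factorial(count)
--     return num // denom
-- ===== SOURCE B (Python) =====
-- from math import comb
-- from collections import Counter
--
-- def count_permutations_with_repetitions(items: list):
--     result = 1
--     total = 0
--     for count in Counter(items).values():
--         total += count
--         result *= comb(total, count)
--     return result
-- ===== Notes on version B (the rewrite author's own statement) =====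
-- stated objective: idiomatic
-- what changed: Replaces factorial(len(items)) and a separate denominator product with a single fold of successive binomial coefficients (result *= comb(total, count) with a running total), so no big factorial or division is ever formed.
import Mathlib
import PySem

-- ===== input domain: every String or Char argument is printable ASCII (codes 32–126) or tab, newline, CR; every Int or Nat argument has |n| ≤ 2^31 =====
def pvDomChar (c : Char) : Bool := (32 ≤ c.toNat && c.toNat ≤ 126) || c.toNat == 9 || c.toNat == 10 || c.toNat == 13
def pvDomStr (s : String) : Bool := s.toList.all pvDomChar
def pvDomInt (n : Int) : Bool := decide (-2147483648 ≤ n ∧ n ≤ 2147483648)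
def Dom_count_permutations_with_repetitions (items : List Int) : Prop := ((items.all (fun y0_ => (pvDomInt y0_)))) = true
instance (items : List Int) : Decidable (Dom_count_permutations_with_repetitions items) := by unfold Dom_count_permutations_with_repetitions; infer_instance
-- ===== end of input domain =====

-- B computes the same multinomial by a running product of binomial coefficients
-- (total += count; result *= comb(total, count)) instead of factorial(len)//∏count!;
-- objective: idiomatic (no big factorial or division is formed).

-- ===== PORT A =====
-- counts.values() holds nonneg counts; math.factorial on such an Int is Nat.factorial of its toNat
def count_permutations_with_repetitions (items : List Int) : Int :=
  let counts := PySem.Dict.counter items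
  let num : Int := (Nat.factorial items.length : Int)
  let denom : Int :=
    counts.values.foldl (fun denom count => denom * (Nat.factorial count.toNat : Int)) 1
  PySem.Int.floordiv num denom

-- ===== PORT B =====
-- the two loop variables (total, result) become one pair-valued fold state;
-- math.comb(n, k) on nonneg Ints is Nat.choose of the toNats
def count_permutations_with_repetitions_alt (items : List Int) : Int :=
  let st :=
    (PySem.Dict.counter items).values.foldl
      (fun (st : Int × Int) count =>
        let total := st.1 + count
        (total, st.2 * (Nat.choose total.toNat count.toNat : Int)))
      (0, 1)
  st.2

-- ===== PRECONDITION & SPEC =====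
def Spec_count_permutations_with_repetitions (items : List Int) (out : Int) : Prop := out = count_permutations_with_repetitions_alt items
instance (items : List Int) (out : Int) : Decidable (Spec_count_permutations_with_repetitions items out) := by unfold Spec_count_permutations_with_repetitions; infer_instance

-- ===== CLAIM (what is proved, stated in full; the proofs are below) =====
def Claim_equal_count_permutations_with_repetitions : Prop := ∀ (items : List Int), Dom_count_permutations_with_repetitions items → Spec_count_permutations_with_repetitions items (count_permutations_with_repetitions items)

-- ===== LEMMAS AND PROOFS =====

-- product of Nat.choose factors along the running totals, starting from total t
def pvMultN : Nat → List Nat → Nat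
  | _, [] => 1
  | t, c :: cs => (t + c).choose c * pvMultN (t + c) cs

theorem pvKey (cs : List Nat) : ∀ t : Nat,
    Nat.factorial (t + cs.sum) =
      Nat.factorial t * (cs.map Nat.factorial).prod * pvMultN t cs := by
  induction cs with
  | nil => intro t; simp [pvMultN]
  | cons c cs ih =>
    intro t
    have h := Nat.choose_mul_factorial_mul_factorial (n := t + c) (k := c) (Nat.le_add_left _ _)
    have h' : t + c - c = t := by omega
    rw [h'] at h
    have hs : t + (c :: cs).sum = (t + c) + cs.sum := by simp; omega
    rw [hs, ih (t + c), ← h]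
    simp [pvMultN]
    ring

theorem pvFoldA (cs : List Nat) : ∀ d : Int,
    (cs.map (fun (n : Nat) => (n : Int))).foldl
        (fun denom count => denom * (Nat.factorial count.toNat : Int)) d
      = d * ((cs.map Nat.factorial).prod : Int) := by
  induction cs with
  | nil => intro d; simp
  | cons c cs ih =>
    intro d
    simp only [List.map_cons, List.foldl_cons, Int.toNat_natCast, ih]
    push_cast
    rw [List.map_cons, List.prod_cons]
    ring

theorem pvFoldB (cs : List Nat) : ∀ (t : Nat) (r : Int),
    (cs.map (fun (n : Nat) => (n : Int))).foldl
        (fun (st : Int × Int) count =>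
          ((st.1 + count), st.2 * (Nat.choose (st.1 + count).toNat count.toNat : Int)))
        ((t : Int), r)
      = (((t + cs.sum : Nat) : Int), r * (pvMultN t cs : Int)) := by
  induction cs with
  | nil => intro t r; simp [pvMultN]
  | cons c cs ih =>
    intro t r
    have hc : (t : Int) + (c : Int) = ((t + c : Nat) : Int) := by push_cast; ring
    simp only [List.map_cons, List.foldl_cons, hc, Int.toNat_natCast, ih (t + c)]
    simp only [pvMultN, List.sum_cons, Prod.mk.injEq]
    refine ⟨by congr 1; omega, by push_cast; ring⟩

theorem pvValuesCounter (items : List Int) :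
    (PySem.Dict.counter items).values
      = ((PySem.Set.ofList items).map (fun k => items.count k)).map (fun (n : Nat) => (n : Int)) := by
  have h : (PySem.Dict.counter items).values
      = (PySem.Dict.counter items).items.map (·.2) := rfl
  rw [h, PySem.Dict.items_counter]
  simp

theorem pvSumCounts (items : List Int) :
    ((PySem.Set.ofList items).map (fun k => items.count k)).sum = items.length := by
  have hperm : List.Perm (PySem.Set.ofList items) items.dedup := by
    rw [List.perm_ext_iff_of_nodup (PySem.Set.nodup_ofList items) items.nodup_dedup]
    intro a
    rw [PySem.Set.mem_ofList, List.mem_dedup]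
  calc ((PySem.Set.ofList items).map (fun k => items.count k)).sum
      = (items.dedup.map (fun k => items.count k)).sum :=
        (hperm.map (fun k => items.count k)).sum_eq
    _ = items.length := List.sum_map_count_dedup_eq_length items

-- ===== VERDICT (by name: the statement is the Claim_ definition above) =====
theorem count_permutations_with_repetitions_spec : Claim_equal_count_permutations_with_repetitions := by
  intro items _
  unfold Spec_count_permutations_with_repetitions
  show PySem.Int.floordiv ((Nat.factorial items.length : Int))
      ((PySem.Dict.counter items).values.foldl
        (fun denom count => denom * (Nat.factorial count.toNat : Int)) 1)
    = ((PySem.Dict.counter items).values.foldl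
        (fun (st : Int × Int) count =>
          ((st.1 + count), st.2 * (Nat.choose (st.1 + count).toNat count.toNat : Int)))
        (0, 1)).2
  set cs := (PySem.Set.ofList items).map (fun k => items.count k) with hcs
  rw [pvValuesCounter items, pvFoldA cs 1]
  have h0 : ((0 : Int), (1 : Int)) = (((0 : Nat) : Int), (1 : Int)) := by norm_num
  rw [← hcs, h0, pvFoldB cs 0 1]
  have hlen : items.length = cs.sum := (pvSumCounts items).symm
  have hkey := pvKey cs 0
  simp only [Nat.zero_add, Nat.factorial_zero, one_mul] at hkey
  have hpos : 0 < (cs.map Nat.factorial).prod := by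
    apply List.prod_pos
    intro a ha
    rcases List.mem_map.mp ha with ⟨c, _, rfl⟩
    exact Nat.factorial_pos c
  rw [hlen, hkey]
  have : PySem.Int.floordiv (((cs.map Nat.factorial).prod * pvMultN 0 cs : Nat) : Int)
      (1 * ((cs.map Nat.factorial).prod : Int)) = ((pvMultN 0 cs : Nat) : Int) := by
    rw [one_mul]
    rw [PySem.Int.floordiv_natCast]
    rw [Nat.mul_div_cancel_left _ hpos]
  rw [this]
  ring
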